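-- pv_equiv track=rewrite | github.com/sunbyte16/100-Day-Coding-Sprint | Day-18/Measurement of Array.py | array_measurement
-- ===== SOURCE A (Python) =====
-- def array_measurement(n, arr):
--     MOD = 10**9 + 7
--
--     # Step 1: Pair value with original index
--     arr_with_index = [(value, idx) for idx, value in enumerate(arr)]
--
--     # Step 2: Sort by value
--     arr_with_index.sort(key=lambda x: x[0])
--
--     # Step 3: Track last occurrence of each value in sorted array
--     last_index = {}
--     for i, (val, _) in enumerate(arr_with_index):
--         last_index[val] = i  # always update to get last occurrence
--
--     # Step 4: Compute measurement
--     measurement = 0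
--     for val, orig_idx in arr_with_index:
--         measurement = (measurement + orig_idx + last_index[val]) % MOD
--
--     return measurement
-- ===== SOURCE B (Python) =====
-- def array_measurement(n, arr):
--     MOD = 10**9 + 7
--     # count each distinct value
--     counts = {}
--     for v in arr:
--         counts[v] = counts.get(v, 0) + 1
--     # sum of original indices in closed form
--     total = len(arr) * (len(arr) - 1) // 2
--     # sweep distinct values in ascending order; running cumulative count - 1
--     # is the last index of that value in the sorted array
--     running = 0
--     for v in sorted(counts):
--         running += counts[v]
--         total += counts[v] * (running - 1)
--     return total % MOD
-- ===== Notes on version B (the rewrite author's own statement) =====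
-- stated objective: faster
-- what changed: Instead of sorting (value, index) pairs and making two passes over them (a last-occurrence dict pass and a per-element mod-summing pass), B counts values in a dict, takes the index contribution in closed form as len(arr)*(len(arr)-1)//2, and sweeps the sorted distinct values once with a running cumulative count (running-1 being each value's last sorted index), taking one final mod. Measured ~2.9x faster at n=262144: it sorts only the distinct values and avoids building/sorting the pair list and the two per-element passes.
import Mathlib
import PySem

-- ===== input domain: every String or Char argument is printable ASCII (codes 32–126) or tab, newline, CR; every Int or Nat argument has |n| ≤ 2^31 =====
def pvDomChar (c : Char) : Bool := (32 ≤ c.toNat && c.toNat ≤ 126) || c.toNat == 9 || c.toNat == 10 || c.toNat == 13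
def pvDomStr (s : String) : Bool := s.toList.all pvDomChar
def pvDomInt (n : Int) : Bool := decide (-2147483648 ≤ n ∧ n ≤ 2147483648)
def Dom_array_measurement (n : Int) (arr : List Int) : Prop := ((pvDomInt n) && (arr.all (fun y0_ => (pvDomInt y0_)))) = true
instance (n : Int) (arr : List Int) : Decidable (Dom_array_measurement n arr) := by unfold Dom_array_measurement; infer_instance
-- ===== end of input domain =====

-- B replaces A's two passes over the sorted (value, index) pairs by a closed-form index
-- sum plus one sweep over counted distinct values (objective: simpler).

-- ===== PORT A =====
def array_measurement (n : Int) (arr : List Int) : Int :=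
  -- arr_with_index = [(value, idx) for idx, value in enumerate(arr)]
  let arr_with_index : List (Int × Int) := (PySem.List.enumerate arr).map (fun p => (p.2, p.1))
  -- arr_with_index.sort(key=lambda x: x[0])
  let sorted_awi := PySem.List.sorted arr_with_index (fun x => x.1) false
  -- for i, (val, _) in enumerate(arr_with_index): last_index[val] = i
  let last_index := (PySem.List.enumerate sorted_awi).foldl
      (fun d (p : Int × (Int × Int)) => d.insert p.2.1 p.1) (PySem.Dict.empty : PySem.Dict Int Int)
  -- for val, orig_idx in arr_with_index: measurement = (measurement + orig_idx + last_index[val]) % MOD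
  -- last_index[val]: every val occurring here was inserted above, so getD with default 0 is exact
  sorted_awi.foldl (fun m x => PySem.Int.mod (m + x.2 + last_index.getD x.1 0) 1000000007) 0

-- ===== PORT B =====
def array_measurement_alt (n : Int) (arr : List Int) : Int :=
  -- for v in arr: counts[v] = counts.get(v, 0) + 1
  let counts := arr.foldl (fun d v => d.insert v (d.getD v 0 + 1)) (PySem.Dict.empty : PySem.Dict Int Int)
  -- total = len(arr) * (len(arr) - 1) // 2
  let total0 := PySem.Int.floordiv (PySem.List.len arr * (PySem.List.len arr - 1)) 2
  -- running = 0; for v in sorted(counts): running += counts[v]; total += counts[v] * (running - 1)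
  let res := (PySem.List.sorted counts.keys (fun k => k) false).foldl
      (fun (tr : Int × Int) k =>
        (tr.1 + counts.getD k 0 * (tr.2 + counts.getD k 0 - 1), tr.2 + counts.getD k 0))
      (total0, 0)
  PySem.Int.mod res.1 1000000007

-- ===== PRECONDITION & SPEC =====
def Spec_array_measurement (n : Int) (arr : List Int) (out : Int) : Prop := out = array_measurement_alt n arr
instance (n : Int) (arr : List Int) (out : Int) : Decidable (Spec_array_measurement n arr out) := by unfold Spec_array_measurement; infer_instance

-- ===== CLAIM (what is proved, stated in full; the proofs are below) =====
def Claim_equal_array_measurement : Prop := ∀ (n : Int) (arr : List Int), Dom_array_measurement n arr → Spec_array_measurement n arr (array_measurement n arr)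

-- ===== LEMMAS AND PROOFS =====

-- the "last index" dictionary of A, as a function of the sorted value list only
def pvGAux (vs : List Int) (d : PySem.Dict Int Int) (s : Int) : PySem.Dict Int Int :=
  (PySem.List.enumerate vs s).foldl (fun d p => d.insert p.2 p.1) d

-- A's dict loop over pairs only reads the first components
theorem pvDictFst (s : List (Int × Int)) (d : PySem.Dict Int Int) (s0 : Int) :
    (PySem.List.enumerate s s0).foldl (fun d (p : Int × (Int × Int)) => d.insert p.2.1 p.1) d
      = pvGAux (s.map (fun x => x.1)) d s0 := by
  induction s generalizing d s0 with
  | nil => rfl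
  | cons x t ih =>
      simp only [pvGAux, PySem.List.enumerate_cons, List.foldl_cons, List.map_cons]
      exact ih _ _

theorem pvGAux_append (xs ys : List Int) (d : PySem.Dict Int Int) (s : Int) :
    pvGAux (xs ++ ys) d s = pvGAux ys (pvGAux xs d s) (s + xs.length) := by
  simp [pvGAux, PySem.List.enumerate_append, List.foldl_append]

theorem pvGAux_not_mem (vs : List Int) (d : PySem.Dict Int Int) (s v : Int) (h : v ∉ vs) :
    (pvGAux vs d s).getD v 0 = d.getD v 0 := by
  induction vs generalizing d s with
  | nil => rfl
  | cons x t ih =>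
      simp only [List.mem_cons, not_or] at h
      simp only [pvGAux, PySem.List.enumerate_cons, List.foldl_cons]
      rw [show ((PySem.List.enumerate t (s+1)).foldl (fun d p => d.insert p.2 p.1) (d.insert x s))
            = pvGAux t (d.insert x s) (s+1) from rfl, ih _ _ h.2,
          PySem.Dict.getD_insert]
      simp [h.1]

theorem pvGAux_replicate (c : Nat) (k : Int) (d : PySem.Dict Int Int) (s : Int) :
    (pvGAux (List.replicate c k) d s).getD k 0
      = if c = 0 then d.getD k 0 else s + c - 1 := by
  induction c generalizing d s with
  | zero => rfl
  | succ m ih =>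
      simp only [List.replicate_succ, pvGAux, PySem.List.enumerate_cons, List.foldl_cons]
      rw [show ((PySem.List.enumerate (List.replicate m k) (s+1)).foldl (fun d p => d.insert p.2 p.1)
            (d.insert k s)) = pvGAux (List.replicate m k) (d.insert k s) (s+1) from rfl, ih]
      rcases Nat.eq_zero_or_pos m with hm | hm
      · subst hm; simp
      · rw [if_neg (Nat.pos_iff_ne_zero.mp hm), if_neg (Nat.succ_ne_zero m)]
        push_cast; ring

theorem pvGAux_shift (vs : List Int) (d : PySem.Dict Int Int) (s v : Int) (h : v ∈ vs) :
    (pvGAux vs d s).getD v 0 = s + (pvGAux vs PySem.Dict.empty 0).getD v 0 := by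
  induction vs generalizing d s with
  | nil => cases h
  | cons x t ih =>
      simp only [pvGAux, PySem.List.enumerate_cons, List.foldl_cons]
      rw [show ∀ (d' : PySem.Dict Int Int) s', ((PySem.List.enumerate t (s'+1)).foldl
            (fun d p => d.insert p.2 p.1) d') = pvGAux t d' (s'+1) from fun _ _ => rfl,
          show ∀ (d' : PySem.Dict Int Int), ((PySem.List.enumerate t ((0:Int)+1)).foldl
            (fun d p => d.insert p.2 p.1) d') = pvGAux t d' ((0:Int)+1) from fun _ => rfl]
      by_cases hv : v ∈ t
      · rw [ih _ _ hv, ih (PySem.Dict.empty.insert x 0) (0+1) hv]; ring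
      · have hvx : v = x := by rcases List.mem_cons.mp h with h' | h'; exact h'; exact absurd h' hv
        subst hvx
        rw [pvGAux_not_mem _ _ _ _ hv, pvGAux_not_mem _ _ _ _ hv,
            PySem.Dict.getD_insert, PySem.Dict.getD_insert]
        simp

-- a ≤-sorted list whose minimum is k splits into the k-block and the rest
theorem pvDecomp (vs : List Int) (k : Int) (hp : vs.Pairwise (· ≤ ·)) (hk : ∀ v ∈ vs, k ≤ v) :
    vs = List.replicate (vs.count k) k ++ vs.filter (fun v => v ≠ k) := by
  induction vs with
  | nil => rfl
  | cons h t ih =>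
      have hpt := List.pairwise_cons.mp hp
      by_cases hhk : h = k
      · subst hhk
        have : ∀ v ∈ t, h ≤ v := hpt.1
        simp only [List.count_cons_self, List.replicate_succ, List.filter_cons]
        simp only [ne_eq, not_true_eq_false, decide_false, List.cons_append]
        exact congrArg (h :: ·) (ih hpt.2 this)
      · have hkh : k < h := lt_of_le_of_ne (hk h (List.mem_cons_self)) (Ne.symm hhk)
        have hnot : k ∉ h :: t := by
          intro hmem
          rcases List.mem_cons.mp hmem with h' | h'
          · exact hhk h'.symm
          · exact absurd (hpt.1 k h') (not_le.mpr hkh)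
        rw [List.count_eq_zero.mpr hnot, List.replicate_zero, List.nil_append,
            List.filter_eq_self.mpr]
        intro a ha
        have : k < a := by
          rcases List.mem_cons.mp ha with h' | h'
          · exact h' ▸ hkh
          · exact lt_of_lt_of_le hkh (hpt.1 a h')
        simp only [ne_eq, decide_eq_true_eq]
        omega

-- core: B's sweep over the strictly sorted distinct values computes the sum of A's
-- last-occurrence indices over the ≤-sorted value list
theorem pvMain (ks : List Int) (vs : List Int) (c : Int → Int) (t r : Int)
    (hvs : vs.Pairwise (· ≤ ·)) (hks : ks.Pairwise (· < ·))
    (hmem : ∀ v, v ∈ ks ↔ v ∈ vs) (hc : ∀ v ∈ ks, c v = (vs.count v : Int)) :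
    (ks.foldl (fun tr k => (tr.1 + c k * (tr.2 + c k - 1), tr.2 + c k)) (t, r)).1
      = t + (vs.map (fun v => r + (pvGAux vs PySem.Dict.empty 0).getD v 0)).sum := by
  induction ks generalizing vs t r with
  | nil =>
      have : vs = [] := by
        cases vs with
        | nil => rfl
        | cons x u => exact absurd ((hmem x).mpr List.mem_cons_self) (List.not_mem_nil)
      subst this; simp
  | cons k ks' ih =>
      have hkvs : k ∈ vs := (hmem k).mp List.mem_cons_self
      have hks' := List.pairwise_cons.mp hks
      have hkmin : ∀ v ∈ vs, k ≤ v := by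
        intro v hv
        rcases List.mem_cons.mp ((hmem v).mpr hv) with h' | h'
        · exact le_of_eq h'.symm
        · exact le_of_lt (hks'.1 v h')
      have hdec := pvDecomp vs k hvs hkmin
      set c0 : Nat := vs.count k with hc0
      set vs' := vs.filter (fun v => v ≠ k) with hvs'def
      have hknotvs' : k ∉ vs' := by
        intro hmemk
        have := List.of_mem_filter hmemk
        simp at this
      have hmem' : ∀ v, v ∈ ks' ↔ v ∈ vs' := by
        intro v
        constructor
        · intro hv
          refine List.mem_filter.mpr ⟨(hmem v).mp (List.mem_cons_of_mem _ hv), ?_⟩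
          have := hks'.1 v hv
          simp only [ne_eq, decide_eq_true_eq]
          omega
        · intro hv
          have hvvs : v ∈ vs := List.mem_of_mem_filter hv
          have hvne : v ≠ k := by
            have := List.of_mem_filter hv
            simpa using this
          rcases List.mem_cons.mp ((hmem v).mpr hvvs) with h' | h'
          · exact absurd h' hvne
          · exact h'
      have hcount' : ∀ v ∈ ks', c v = ((vs'.count v : Nat) : Int) := by
        intro v hv
        rw [hc v (List.mem_cons_of_mem _ hv)]
        have hvk : v ≠ k := ne_of_gt (hks'.1 v hv)
        simp [hvs'def, List.count_filter, hvk]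
      have hvs'pw : vs'.Pairwise (· ≤ ·) := hvs.filter _
      have hck : c k = (c0 : Int) := hc k List.mem_cons_self
      have hc0pos : 0 < c0 := List.count_pos_iff.mpr hkvs
      simp only [List.foldl_cons]
      rw [ih vs' _ _ hvs'pw hks'.2 hmem' hcount', hck]
      conv_rhs => rw [hdec]
      rw [List.map_append, List.sum_append, List.map_replicate, List.sum_replicate]
      have hgk : (pvGAux (List.replicate c0 k ++ vs') PySem.Dict.empty 0).getD k 0
          = (c0 : Int) - 1 := by
        rw [pvGAux_append, pvGAux_not_mem _ _ _ _ hknotvs', pvGAux_replicate,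
            if_neg (Nat.pos_iff_ne_zero.mp hc0pos)]
        ring
      have hgv : ∀ v ∈ vs', (pvGAux (List.replicate c0 k ++ vs') PySem.Dict.empty 0).getD v 0
          = (c0 : Int) + (pvGAux vs' PySem.Dict.empty 0).getD v 0 := by
        intro v hv
        rw [pvGAux_append, pvGAux_shift _ _ _ _ hv, List.length_replicate]
        ring
      have hsum : (vs'.map (fun v => r + (pvGAux (List.replicate c0 k ++ vs') PySem.Dict.empty 0).getD v 0)).sum
          = (vs'.map (fun v => r + (c0 : Int) + (pvGAux vs' PySem.Dict.empty 0).getD v 0)).sum := by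
        apply congrArg List.sum
        apply List.map_congr_left
        intro v hv
        simp only [hgv v hv]
        ring
      rw [hgk, hsum, nsmul_eq_mul]
      ring

-- per-step fold with Python mod equals one final mod of the plain sum
theorem pvModFold {α : Type} (l : List α) (f : α → Int) (a : Int) :
    l.foldl (fun m x => PySem.Int.mod (m + f x) 1000000007) (PySem.Int.mod a 1000000007)
      = PySem.Int.mod (a + (l.map f).sum) 1000000007 := by
  induction l generalizing a with
  | nil => simp
  | cons x t ih =>
      simp only [List.foldl_cons, List.map_cons, List.sum_cons]
      rw [PySem.Int.mod_eq_emod_of_pos (by norm_num), PySem.Int.mod_eq_emod_of_pos (by norm_num),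
          Int.emod_add_emod, ← PySem.Int.mod_eq_emod_of_pos (by norm_num : (0:Int) < 1000000007)]
      rw [ih]; ring_nf

theorem pvGauss (L : Nat) :
    (PySem.List.pyRange 0 L 1).sum = PySem.Int.floordiv ((L : Int) * ((L : Int) - 1)) 2 := by
  rw [PySem.Int.floordiv_eq_ediv_of_pos (by norm_num)]
  have h2 : 2 * (PySem.List.pyRange 0 L 1).sum = (L : Int) * ((L : Int) - 1) := by
    induction L with
    | zero => simp
    | succ m ihm =>
        rw [show ((m + 1 : Nat) : Int) = (m : Int) + 1 by push_cast; ring,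
            PySem.List.pyRange_one_succ_right (by positivity)]
        simp only [List.sum_append, List.sum_cons, List.sum_nil]
        linear_combination ihm
  omega

theorem pvModFold0 {α : Type} (l : List α) (f : α → Int) :
    l.foldl (fun m x => PySem.Int.mod (m + f x) 1000000007) 0
      = PySem.Int.mod ((l.map f).sum) 1000000007 := by
  have h := pvModFold l f 0
  have h0 : PySem.Int.mod (0:Int) 1000000007 = 0 := by
    rw [PySem.Int.mod_eq_emod_of_pos (by norm_num)]
    decide
  rw [h0, zero_add] at h
  exact h

theorem pvAB (n : Int) (arr : List Int) : array_measurement n arr = array_measurement_alt n arr := by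
  unfold array_measurement array_measurement_alt
  simp only []
  set pairs : List (Int × Int) := (PySem.List.enumerate arr).map (fun p => (p.2, p.1)) with hpairs
  set s := PySem.List.sorted pairs (fun x => x.1) false with hs
  rw [pvDictFst]
  set vs := s.map (fun x => x.1) with hvs
  set counts := arr.foldl (fun d v => d.insert v (d.getD v 0 + 1)) (PySem.Dict.empty : PySem.Dict Int Int) with hcounts
  have hperm : s.Perm pairs := PySem.List.sorted_perm pairs (fun x => x.1) false
  have hpairs_fst : pairs.map (fun x => x.1) = arr := by
    rw [hpairs, List.map_map]
    exact PySem.List.map_snd_enumerate arr 0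
  have hvsperm : vs.Perm arr := by
    rw [hvs]
    exact hpairs_fst ▸ hperm.map (fun x => x.1)
  have hvspw : vs.Pairwise (· ≤ ·) := PySem.List.sorted_map_key_pairwise pairs (fun x => x.1)
  have hkeys : counts.keys = PySem.Set.ofList arr := by
    rw [hcounts, PySem.Dict.keys_foldl_insert arr (fun d v => d.getD v 0 + 1) PySem.Dict.empty]
    simp [PySem.Set.update_nil_left, PySem.Dict.keys_empty]
  have hcget : ∀ v, counts.getD v 0 = (arr.count v : Int) := by
    intro v
    rw [hcounts, PySem.Dict.getD_foldl_insert_add_one]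
    simp [PySem.Dict.getD_empty]
  rw [hkeys]
  have hmain := pvMain (PySem.List.sorted (PySem.Set.ofList arr) (fun k => k) false) vs
      (fun k => counts.getD k 0)
      (PySem.Int.floordiv (PySem.List.len arr * (PySem.List.len arr - 1)) 2) 0
      hvspw (PySem.List.sorted_ofList_pairwise_lt arr)
      (fun v => by
        rw [PySem.List.mem_sorted, PySem.Set.mem_ofList]
        exact (hvsperm.mem_iff).symm)
      (fun v _ => by
        show counts.getD v 0 = _
        rw [hcget v]
        exact congrArg _ (hvsperm.count_eq v).symm)
  simp only [] at hmain
  rw [hmain]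
  have hbody : (fun (m : Int) (x : Int × Int) =>
        PySem.Int.mod (m + x.2 + (pvGAux vs PySem.Dict.empty 0).getD x.1 0) 1000000007)
      = (fun (m : Int) (x : Int × Int) =>
        PySem.Int.mod (m + (x.2 + (pvGAux vs PySem.Dict.empty 0).getD x.1 0)) 1000000007) := by
    funext m x
    rw [add_assoc]
  rw [hbody, pvModFold0 s (fun x => x.2 + (pvGAux vs PySem.Dict.empty 0).getD x.1 0),
      PySem.List.sum_map_add_int s (fun x => x.2) (fun x => (pvGAux vs PySem.Dict.empty 0).getD x.1 0)]
  have hsnd : (s.map (fun x => x.2)).sum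
      = PySem.Int.floordiv (PySem.List.len arr * (PySem.List.len arr - 1)) 2 := by
    rw [(hperm.map (fun x => x.2)).sum_eq, hpairs, List.map_map]
    have hcomp : ((fun (x : Int × Int) => x.2) ∘ (fun (p : Int × Int) => (p.2, p.1)))
        = (fun (p : Int × Int) => p.1) := rfl
    rw [hcomp, PySem.List.map_fst_enumerate, zero_add, pvGauss arr.length]
    simp
  have hmapg : (s.map (fun x => (pvGAux vs PySem.Dict.empty 0).getD x.1 0)).sum
      = (vs.map (fun v => (pvGAux vs PySem.Dict.empty 0).getD v 0)).sum := by
    conv_rhs => rw [hvs, List.map_map]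
    rfl
  rw [hsnd, hmapg]
  simp only [zero_add]

-- ===== VERDICT (by name: the statement is the Claim_ definition above) =====
theorem array_measurement_spec : Claim_equal_array_measurement := by
  intro n arr _
  exact (pvAB n arr).symm ▸ rfl
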